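-- pv_equiv track=rewrite | github.com/epstlight/algorithm | SW_EA/0904/SolvingClub_단조.py | check_danjo
-- ===== SOURCE A (Python) =====
-- def check_danjo(num):
--     num_list = []
--     while num > 0:
--         num_list.append(num % 10)
--         num //= 10
--     for i in range(len(num_list)-1):
--         if num_list[i] < num_list[i+1]:
--             return False
--     return True
-- ===== SOURCE B (Python) =====
-- def check_danjo(num):
--     num_list = []
--     while num > 0:
--         num_list.append(num % 10)
--         num //= 10
--     return num_list == sorted(num_list, reverse=True)
-- ===== Notes on version B (the rewrite author's own statement) =====
-- stated objective: idiomatic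
-- what changed: Replaces the index-based adjacency-comparison loop with a single sort-and-compare: the LSB-first digit list is monotonic exactly when it equals its own descending sort.
import Mathlib
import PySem

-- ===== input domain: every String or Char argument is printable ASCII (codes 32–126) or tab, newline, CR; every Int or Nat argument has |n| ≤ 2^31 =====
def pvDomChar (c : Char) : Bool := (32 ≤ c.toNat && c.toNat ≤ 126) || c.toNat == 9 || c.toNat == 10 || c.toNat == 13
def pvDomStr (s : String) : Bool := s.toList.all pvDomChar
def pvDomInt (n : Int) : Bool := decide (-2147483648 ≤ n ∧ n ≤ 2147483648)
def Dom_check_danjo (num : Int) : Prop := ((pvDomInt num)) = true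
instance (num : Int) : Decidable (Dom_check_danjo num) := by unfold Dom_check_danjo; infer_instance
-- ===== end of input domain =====

-- B replaces A's index-based adjacency loop with a sort-and-compare over the same digit list (idiomatic; not faster).

-- ===== PORT A =====
-- the shared while-loop: append num % 10, num //= 10 while num > 0 (LSB-first digit list)
def pvDigits (num : Int) : List Int :=
  if _h : 0 < num then
    PySem.Int.mod num 10 :: pvDigits (PySem.Int.floordiv num 10)
  else []
termination_by num.toNat
decreasing_by
  have h10 : (0:Int) < 10 := by norm_num
  rw [PySem.Int.floordiv_eq_ediv_of_pos h10]
  omega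

-- the for-loop over range(len(num_list)-1) with its early 'return False' on num_list[i] < num_list[i+1]
def pvAdjLoop : List Int → Bool
  | a :: b :: t => if a < b then false else pvAdjLoop (b :: t)
  | _ => true

def check_danjo (num : Int) : Bool := pvAdjLoop (pvDigits num)

-- ===== PORT B =====
def check_danjo_alt (num : Int) : Bool :=
  let num_list := pvDigits num
  num_list == PySem.List.sorted num_list (fun x => x) true

-- ===== PRECONDITION & SPEC =====
def Spec_check_danjo (num : Int) (out : Bool) : Prop := out = check_danjo_alt num
instance (num : Int) (out : Bool) : Decidable (Spec_check_danjo num out) := by unfold Spec_check_danjo; infer_instance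

-- ===== CLAIM (what is proved, stated in full; the proofs are below) =====
def Claim_equal_check_danjo : Prop := ∀ (num : Int), Dom_check_danjo num → Spec_check_danjo num (check_danjo num)

-- ===== LEMMAS AND PROOFS =====

theorem pvAdjLoop_iff_pairwise : ∀ l : List Int, pvAdjLoop l = true ↔ l.Pairwise (fun a b => b ≤ a)
  | [] => by simp [pvAdjLoop]
  | [a] => by simp [pvAdjLoop]
  | a :: b :: u => by
      have ih := pvAdjLoop_iff_pairwise (b :: u)
      simp only [pvAdjLoop]
      split_ifs with h
      · simp only [false_iff]
        intro hp
        have := (List.pairwise_cons.mp hp).1 b (by simp)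
        omega
      · rw [ih]
        simp only [List.pairwise_cons, List.mem_cons]
        constructor
        · rintro ⟨hb, hu⟩
          refine ⟨?_, hb, hu⟩
          intro x hx
          rcases hx with hx | hx
          · omega
          · have := hb x hx
            omega
        · rintro ⟨_, hb, hu⟩
          exact ⟨hb, hu⟩

theorem pvLoop_eq_sorted (l : List Int) :
    pvAdjLoop l = (l == PySem.List.sorted l (fun x => x) true) := by
  by_cases h : pvAdjLoop l = true
  · rw [h]
    have hp := (pvAdjLoop_iff_pairwise l).mp h
    rw [PySem.List.sorted_rev_eq_self_of_pairwise l (fun x => x) hp]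
    simp
  · rw [Bool.not_eq_true] at h
    rw [h]
    symm
    rw [beq_eq_false_iff_ne]
    intro he
    have hp : l.Pairwise (fun a b : Int => b ≤ a) := by
      rw [he]; exact PySem.List.sorted_pairwise_rev l (fun x => x) |>.imp (by intro a b hh; exact hh)
    rw [← pvAdjLoop_iff_pairwise] at hp
    rw [h] at hp; exact Bool.false_ne_true hp

-- ===== VERDICT (by name: the statement is the Claim_ definition above) =====
theorem check_danjo_spec : Claim_equal_check_danjo := by
  intro num _
  unfold Spec_check_danjo check_danjo check_danjo_alt
  exact pvLoop_eq_sorted (pvDigits num)
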